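-- pv_equiv track=rewrite | github.com/vskh/platformio-tools | generate_pio_build.py | clean_recipe
-- ===== SOURCE A (Python) =====
-- from typing import Dict, List, Set, Tuple, Callable, AnyStr, Any
--
-- def clean_recipe(recipe: List[AnyStr]) -> List[AnyStr]:
--     # pop first element containing command
--     recipe.pop(0)
--
--     # remove any output spec
--     if "-o" in recipe:
--         output_opt = recipe.index("-o")
--         recipe = recipe[0:output_opt] + recipe[output_opt + 2:]
--
--     # filter tokens
--     to_clean = ["{includes}", "{object_files}", "{source_file}"]
--     recipe = [token for token in recipe if token not in to_clean]
--
--     return recipe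
-- ===== SOURCE B (Python) =====
-- def clean_recipe(recipe):
--     # pop first element containing command (same mutation as A)
--     recipe.pop(0)
--     out = []
--     skip_next = False
--     removed_o = False
--     for token in recipe:
--         if skip_next:
--             skip_next = False
--             continue
--         if token == "-o" and not removed_o:
--             skip_next = True
--             removed_o = True
--             continue
--         if token in ("{includes}", "{object_files}", "{source_file}"):
--             continue
--         out.append(token)
--     return out
-- ===== Notes on version B (the rewrite author's own statement) =====
-- stated objective: simpler
-- what changed: Replaces the index+slice '-o' removal followed by a separate filtering comprehension with one single pass using skip_next/removed_o flags.
-- outside the precondition, e.g. on clean_recipe([]): A raises IndexError, B raises IndexError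
import Mathlib
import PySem

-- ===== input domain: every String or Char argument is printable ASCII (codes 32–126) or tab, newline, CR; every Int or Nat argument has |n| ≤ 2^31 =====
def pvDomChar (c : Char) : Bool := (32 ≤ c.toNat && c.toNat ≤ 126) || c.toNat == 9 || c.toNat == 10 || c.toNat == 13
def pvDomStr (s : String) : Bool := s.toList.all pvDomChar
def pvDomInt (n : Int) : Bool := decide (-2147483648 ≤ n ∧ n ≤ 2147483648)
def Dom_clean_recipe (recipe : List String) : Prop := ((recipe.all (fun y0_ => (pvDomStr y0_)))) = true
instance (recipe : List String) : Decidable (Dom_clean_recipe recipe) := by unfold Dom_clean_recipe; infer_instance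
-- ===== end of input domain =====

-- B replaces A's index+slice '-o' removal plus separate filtering pass with one single-pass
-- loop carrying skip_next/removed_o flags (objective: simpler). Both A and B pop recipe[0]
-- in place (same mutation); the equivalence proved is about the return value.


-- ===== PORT A =====
def clean_recipe (recipe : List String) : List String :=
  -- recipe.pop(0) raises IndexError on []; Pre_clean_recipe excludes that, so tail is exact
  let r := recipe.tail
  let r2 := if "-o" ∈ r then
      match PySem.List.index? r "-o" with
      | some i => r.take i ++ r.drop (i + 2)   -- r[0:i] ++ r[i+2:], exact: 0 ≤ i < r.length
      | none => r
    else r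
  r2.filter (fun token => decide (token ∉ ["{includes}", "{object_files}", "{source_file}"]))

-- ===== PORT B =====
def pvAltLoop : List String → Bool → Bool → List String
  | [], _, _ => []
  | token :: ts, skip_next, removed_o =>
    if skip_next then pvAltLoop ts false removed_o
    else if token == "-o" && !removed_o then pvAltLoop ts true true
    else if token == "{includes}" || token == "{object_files}" || token == "{source_file}" then
      pvAltLoop ts false removed_o
    else token :: pvAltLoop ts false removed_o

def clean_recipe_alt (recipe : List String) : List String :=
  -- recipe.pop(0) raises IndexError on []; Pre_clean_recipe excludes that, so tail is exact
  pvAltLoop recipe.tail false false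

-- ===== PRECONDITION & SPEC =====
-- Pre_ excludes only the empty list, on which A's recipe.pop(0) raises IndexError (B raises there too).
def Pre_clean_recipe (recipe : List String) : Prop := recipe ≠ []
instance (recipe : List String) : Decidable (Pre_clean_recipe recipe) := by unfold Pre_clean_recipe; infer_instance
def pvWitness_clean_recipe : List String := (["cc", "-o", "out", "{source_file}", "-c"])
def Spec_clean_recipe (recipe : List String) (out : List String) : Prop := out = clean_recipe_alt recipe
instance (recipe : List String) (out : List String) : Decidable (Spec_clean_recipe recipe out) := by unfold Spec_clean_recipe; infer_instance

-- ===== CLAIM (what is proved, stated in full; the proofs are below) =====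
def Claim_equal_clean_recipe : Prop := ∀ (recipe : List String), Dom_clean_recipe recipe → Pre_clean_recipe recipe → Spec_clean_recipe recipe (clean_recipe recipe)

-- ===== LEMMAS AND PROOFS =====

def pvKeep (t : String) : Bool := decide (t ∉ ["{includes}", "{object_files}", "{source_file}"])

-- after the one '-o' has been consumed the loop is a plain filter
theorem pvAltLoop_removed (ts : List String) : pvAltLoop ts false true = ts.filter pvKeep := by
  induction ts with
  | nil => rfl
  | cons t ts ih =>
    by_cases hp : t = "{includes}" ∨ t = "{object_files}" ∨ t = "{source_file}"
    · rcases hp with h | h | h <;> subst h <;> simp [pvAltLoop, pvKeep, ih]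
    · push Not at hp
      obtain ⟨h1, h2, h3⟩ := hp
      simp [pvAltLoop, pvKeep, h1, h2, h3, ih]

-- with no '-o' present the loop is also a plain filter
theorem pvAltLoop_noO (ts : List String) (h : "-o" ∉ ts) :
    pvAltLoop ts false false = ts.filter pvKeep := by
  induction ts with
  | nil => rfl
  | cons t ts ih =>
    have ht : t ≠ "-o" := fun e => h (e ▸ List.mem_cons_self ..)
    have hts : "-o" ∉ ts := fun m => h (List.mem_cons_of_mem _ m)
    by_cases hp : t = "{includes}" ∨ t = "{object_files}" ∨ t = "{source_file}"
    · rcases hp with h | h | h <;> subst h <;> simp [pvAltLoop, pvKeep, ih hts]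
    · push Not at hp
      obtain ⟨h1, h2, h3⟩ := hp
      simp [pvAltLoop, pvKeep, ht, h1, h2, h3, ih hts]

-- the single-pass loop equals A's remove-first-'-o'-slice followed by the filter
theorem pvMain (r : List String) :
    pvAltLoop r false false =
      (if "-o" ∈ r then
        match PySem.List.index? r "-o" with
        | some i => r.take i ++ r.drop (i + 2)
        | none => r
      else r).filter pvKeep := by
  induction r with
  | nil => rfl
  | cons t ts ih =>
    by_cases h : t = "-o"
    · subst h
      have hm : "-o" ∈ ("-o" :: ts) := List.mem_cons_self ..
      rw [if_pos hm, PySem.List.index?_cons_self]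
      show pvAltLoop ("-o" :: ts) false false =
        (List.take 0 ("-o" :: ts) ++ List.drop (0 + 2) ("-o" :: ts)).filter pvKeep
      have lhs : pvAltLoop ("-o" :: ts) false false = pvAltLoop ts true true := by
        simp [pvAltLoop]
      rw [lhs]
      cases ts with
      | nil => rfl
      | cons u us =>
        have : pvAltLoop (u :: us) true true = pvAltLoop us false true := by
          simp [pvAltLoop]
        rw [this, pvAltLoop_removed]
        rfl
    · by_cases hmem : "-o" ∈ ts
      · have hmem' : "-o" ∈ (t :: ts) := List.mem_cons_of_mem _ hmem
        obtain ⟨i, hi⟩ := Option.isSome_iff_exists.mp ((PySem.List.index?_isSome_iff ts "-o").mpr hmem)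
        rw [if_pos hmem', PySem.List.index?_cons_of_ne ts h, hi]
        simp only [Option.map_some]
        rw [if_pos hmem, hi] at ih
        show pvAltLoop (t :: ts) false false =
          ((t :: ts).take (i + 1) ++ (t :: ts).drop (i + 1 + 2)).filter pvKeep
        have hdrop : (t :: ts).drop (i + 1 + 2) = ts.drop (i + 2) := by
          have e : i + 1 + 2 = (i + 2) + 1 := by omega
          rw [e, List.drop_succ_cons]
        rw [List.take_succ_cons, hdrop, List.cons_append]
        by_cases hp : t = "{includes}" ∨ t = "{object_files}" ∨ t = "{source_file}"
        · rcases hp with hq | hq | hq <;> subst hq <;> simp [pvAltLoop, pvKeep, ih]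
        · push Not at hp
          obtain ⟨h1, h2, h3⟩ := hp
          simp [pvAltLoop, pvKeep, h, h1, h2, h3, ih]
      · have hmem' : "-o" ∉ (t :: ts) := by
          intro hc
          rcases List.mem_cons.mp hc with e | m
          · exact h e.symm
          · exact hmem m
        rw [if_neg hmem']
        exact pvAltLoop_noO _ hmem'

-- ===== VERDICT (by name: the statement is the Claim_ definition above) =====
theorem clean_recipe_spec : Claim_equal_clean_recipe := by
  intro recipe _ _
  show clean_recipe recipe = clean_recipe_alt recipe
  exact (pvMain recipe.tail).symm
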